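-- pv_equiv track=rewrite | github.com/esc0rtd3w/firestick-loader-kodi-data | addons/plugin.video.sportcenterhd/commonresolvers.py | google
-- ===== SOURCE A (Python) =====
-- def google(url):
--     try:
--         if any(x in url for x in ['&itag=37&', '&itag=137&', '&itag=299&', '&itag=96&', '&itag=248&', '&itag=303&', '&itag=46&']): quality = '1080p'
--         elif any(x in url for x in ['&itag=22&', '&itag=84&', '&itag=136&', '&itag=298&', '&itag=120&', '&itag=95&', '&itag=247&', '&itag=302&', '&itag=45&', '&itag=102&']): quality = 'HD'
--         else: raise Exception()
--
--         url = [{'quality': quality, 'url': url}]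
--         return url
--     except:
--         return
-- ===== SOURCE B (Python) =====
-- def google(url):
--     try:
--         # one pass: extract every maximal digit run following '&itag=' that is
--         # terminated by '&', then classify via two sets
--         tags = []
--         i = 0
--         n = len(url)
--         while i < n:
--             if url[i] == '&' and url[i+1:i+6] == 'itag=':
--                 j = i + 6
--                 while j < n and url[j].isdigit():
--                     j += 1
--                 if j > i + 6 and j < n and url[j] == '&':
--                     tags.append(url[i+6:j])
--                     i = j          # resume at the terminating '&'
--                     continue
--             i += 1
--         if any(t in {'37', '137', '299', '96', '248', '303', '46'} for t in tags):
--             quality = '1080p'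
--         elif any(t in {'22', '84', '136', '298', '120', '95', '247', '302', '45', '102'} for t in tags):
--             quality = 'HD'
--         else:
--             return None
--         return [{'quality': quality, 'url': url}]
--     except Exception:
--         return None
-- ===== Notes on version B (the rewrite author's own statement) =====
-- stated objective: idiomatic
-- what changed: A scans the url 17 times, once per hard-coded itag-marker substring; B makes one left-to-right scan that extracts every ampersand-terminated itag digit run and then classifies the extracted tags against two sets of itag numbers.
import Mathlib
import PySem

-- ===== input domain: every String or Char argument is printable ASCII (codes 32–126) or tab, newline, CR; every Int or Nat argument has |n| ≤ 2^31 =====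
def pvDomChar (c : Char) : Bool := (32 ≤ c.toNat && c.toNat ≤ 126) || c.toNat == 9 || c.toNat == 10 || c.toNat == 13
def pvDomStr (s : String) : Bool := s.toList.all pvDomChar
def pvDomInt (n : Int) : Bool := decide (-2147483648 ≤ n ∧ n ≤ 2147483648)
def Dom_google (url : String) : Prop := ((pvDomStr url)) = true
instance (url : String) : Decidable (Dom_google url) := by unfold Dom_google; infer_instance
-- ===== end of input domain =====

-- B replaces A's 17 substring scans by ONE left-to-right scan that extracts every
-- '&'-terminated itag digit run, then classifies the extracted tags via two sets (idiomatic).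

-- ===== PORT A =====
-- A: `any(x in url for x in [...])` twice, then [{'quality': q, 'url': url}] or None.
def google (url : String) : Option (List (List (String × String))) :=
  if (["&itag=37&", "&itag=137&", "&itag=299&", "&itag=96&", "&itag=248&", "&itag=303&",
       "&itag=46&"].any (fun x => PySem.Str.isIn x url)) then
    some [[("quality", "1080p"), ("url", url)]]
  else if (["&itag=22&", "&itag=84&", "&itag=136&", "&itag=298&", "&itag=120&", "&itag=95&",
       "&itag=247&", "&itag=302&", "&itag=45&", "&itag=102&"].any (fun x => PySem.Str.isIn x url)) then
    some [[("quality", "HD"), ("url", url)]]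
  else none

-- ===== PORT B =====
-- B's scan from Source B: at each position, if "&itag=" starts here and the following maximal
-- digit run is nonempty and terminated by '&', record the run and resume at that '&'.
def extractItags : List Char → List (List Char)
  | [] => []
  | c :: cs =>
    if c = '&' ∧ ['i', 't', 'a', 'g', '='].isPrefixOf cs = true then
      if (cs.drop 5).takeWhile PySem.Chars.isdigit ≠ [] ∧
         ((cs.drop 5).dropWhile PySem.Chars.isdigit).head? = some '&' then
        (cs.drop 5).takeWhile PySem.Chars.isdigit ::
          extractItags ((cs.drop 5).dropWhile PySem.Chars.isdigit)
      else extractItags cs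
    else extractItags cs
termination_by l => l.length
decreasing_by
  · have h1 : ((cs.drop 5).dropWhile PySem.Chars.isdigit).length ≤ (cs.drop 5).length :=
      List.length_dropWhile_le _ _
    have h2 : (cs.drop 5).length ≤ cs.length := by simp [List.length_drop]
    simp only [List.length_cons]; omega
  · simp
  · simp

def set1080 : List (List Char) :=
  [['3','7'], ['1','3','7'], ['2','9','9'], ['9','6'], ['2','4','8'], ['3','0','3'], ['4','6']]

def setHD : List (List Char) :=
  [['2','2'], ['8','4'], ['1','3','6'], ['2','9','8'], ['1','2','0'], ['9','5'], ['2','4','7'],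
   ['3','0','2'], ['4','5'], ['1','0','2']]

def google_alt (url : String) : Option (List (List (String × String))) :=
  let tags := extractItags url.toList
  if tags.any (fun t => set1080.contains t) then
    some [[("quality", "1080p"), ("url", url)]]
  else if tags.any (fun t => setHD.contains t) then
    some [[("quality", "HD"), ("url", url)]]
  else none

-- ===== PRECONDITION & SPEC =====
def Spec_google (url : String) (out : Option (List (List (String × String)))) : Prop := out = google_alt url
instance (url : String) (out : Option (List (List (String × String)))) : Decidable (Spec_google url out) := by unfold Spec_google; infer_instance

-- ===== CLAIM (what is proved, stated in full; the proofs are below) =====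
def Claim_equal_google : Prop := ∀ (url : String), Dom_google url → Spec_google url (google url)

-- ===== LEMMAS AND PROOFS =====

-- the full pattern '&itag=' ++ t ++ '&' as a char list
def pvPat (t : List Char) : List Char := '&' :: 'i' :: 't' :: 'a' :: 'g' :: '=' :: (t ++ ['&'])

-- an occurrence of an '&'-headed pattern cannot start inside an '&'-free prefix
theorem pvSkip (q : List Char) :
    ∀ (pre rest : List Char), '&' ∉ pre →
      (('&' :: q) <:+: (pre ++ rest) ↔ ('&' :: q) <:+: rest) := by
  intro pre
  induction pre with
  | nil => intro rest _; simp
  | cons a pre ih =>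
    intro rest hmem
    have ha : a ≠ '&' := by intro h; exact hmem (by simp [h])
    rw [List.cons_append, List.infix_cons_iff]
    constructor
    · rintro (hpre | hinf)
      · rcases hpre with ⟨u, hu⟩
        exact absurd (by injection hu with h _; exact h.symm) ha
      · exact (ih rest (fun h => hmem (by simp [h]))).mp hinf
    · intro h
      exact Or.inr ((ih rest (fun h => hmem (by simp [h]))).mpr h)

theorem pvTakeDrop (t b : List Char) (hd : ∀ c ∈ t, PySem.Chars.isdigit c = true) :
    (t ++ '&' :: b).takeWhile PySem.Chars.isdigit = t ∧
    (t ++ '&' :: b).dropWhile PySem.Chars.isdigit = '&' :: b := by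
  have hamp : PySem.Chars.isdigit '&' = false := by decide
  induction t with
  | nil => simp [hamp]
  | cons c t ih =>
    have hc : PySem.Chars.isdigit c = true := hd c (by simp)
    have := ih (fun x hx => hd x (by simp [hx]))
    simp [hc, this.1, this.2]

-- key characterisation: the pattern occurs in l iff t is one of the extracted runs
theorem pvKey (t : List Char) (ht : t ≠ []) (hd : ∀ c ∈ t, PySem.Chars.isdigit c = true) :
    ∀ (l : List Char), (pvPat t <:+: l ↔ t ∈ extractItags l) := by
  have main : ∀ (n : ℕ) (l : List Char), l.length ≤ n →
      (pvPat t <:+: l ↔ t ∈ extractItags l) := by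
    intro n
    induction n with
    | zero =>
      intro l hl
      have : l = [] := List.length_eq_zero_iff.mp (Nat.le_zero.mp hl)
      subst this
      simp [extractItags, pvPat]
    | succ n ih =>
      intro l hl
      match l with
      | [] => simp [extractItags, pvPat]
      | c :: cs =>
        have hcs : cs.length ≤ n := by simpa using hl
        rw [extractItags]
        by_cases h6 : c = '&' ∧ ['i', 't', 'a', 'g', '='].isPrefixOf cs = true
        · rw [if_pos h6]
          obtain ⟨hc, hpre⟩ := h6
          subst hc
          obtain ⟨u, hu⟩ := List.isPrefixOf_iff_prefix.mp hpre
          have hdrop : cs.drop 5 = u := by rw [← hu]; simp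
          rw [hdrop]
          have hcsu : cs = ['i', 't', 'a', 'g', '='] ++ u := hu.symm
          by_cases h2 : u.takeWhile PySem.Chars.isdigit ≠ [] ∧
              (u.dropWhile PySem.Chars.isdigit).head? = some '&'
          · rw [if_pos h2]
            obtain ⟨hne, hhead⟩ := h2
            -- name the run and the remainder
            set t' := u.takeWhile PySem.Chars.isdigit with ht'
            set r := u.dropWhile PySem.Chars.isdigit with hr
            obtain ⟨r', hr'⟩ : ∃ r', r = '&' :: r' := by
              cases hrc : r with
              | nil => rw [hrc] at hhead; simp at hhead
              | cons x xs =>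
                rw [hrc] at hhead; simp at hhead; exact ⟨xs, by rw [hhead]⟩
            have hu2 : u = t' ++ '&' :: r' := by
              rw [← hr', ht', hr]; exact (List.takeWhile_append_dropWhile).symm
            have ht'dig : ∀ x ∈ t', PySem.Chars.isdigit x = true := by
              intro x hx; exact List.mem_takeWhile_imp hx
            have hrlen : r.length ≤ n := by
              have h1 : r.length ≤ u.length := by rw [hr]; exact List.length_dropWhile_le _ _
              have h2 : u.length ≤ cs.length := by
                rw [hcsu]; simp only [List.length_append]; omega
              omega
            rw [List.infix_cons_iff]
            constructor
            · rintro (hpref | hinf)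
              · -- prefix forces t = t'
                rw [hcsu] at hpref
                have hta : (t ++ ['&']) <+: u := by
                  simpa [pvPat, List.cons_prefix_cons] using hpref
                obtain ⟨w, hw⟩ := hta
                have huw : u = t ++ '&' :: w := by rw [← hw]; simp
                have : u.takeWhile PySem.Chars.isdigit = t := by
                  rw [huw]; exact (pvTakeDrop t w hd).1
                exact List.mem_cons.mpr (Or.inl (ht'.trans this).symm)
              · -- occurrence inside cs is an occurrence inside r
                right
                rw [hcsu, hu2] at hinf
                have hnomem : '&' ∉ (['i', 't', 'a', 'g', '='] ++ t') := by
                  intro hmem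
                  rcases List.mem_append.mp hmem with h | h
                  · simp at h
                  · exact absurd (ht'dig _ h) (by decide)
                rw [← List.append_assoc] at hinf
                have h5 := (pvSkip _ (['i', 't', 'a', 'g', '='] ++ t') ('&' :: r') hnomem).mp
                  (by simpa [pvPat] using hinf)
                exact (ih r hrlen).mp (by rw [hr']; simpa [pvPat] using h5)
            · intro hmem
              rcases List.mem_cons.mp hmem with heq | hmem'
              · -- t = t' : the pattern is a prefix
                left
                rw [hcsu, hu2, ← heq]
                exact ⟨r', by simp [pvPat]⟩
              · -- occurrence inside r lifts to cs
                right
                have hinf : pvPat t <:+: r := (ih r hrlen).mpr hmem'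
                have hnomem : '&' ∉ (['i', 't', 'a', 'g', '='] ++ t') := by
                  intro hmem2
                  rcases List.mem_append.mp hmem2 with h | h
                  · simp at h
                  · exact absurd (ht'dig _ h) (by decide)
                rw [hr'] at hinf
                rw [hcsu, hu2, ← List.append_assoc]
                exact (pvSkip _ (['i', 't', 'a', 'g', '='] ++ t') ('&' :: r') hnomem).mpr
                  (by simpa [pvPat] using hinf)
          · rw [if_neg h2]
            rw [List.infix_cons_iff]
            constructor
            · rintro (hpref | hinf)
              · -- prefix would make the second guard true: contradiction
                exfalso
                rw [hcsu] at hpref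
                have hta : (t ++ ['&']) <+: u := by
                  simpa [pvPat, List.cons_prefix_cons] using hpref
                obtain ⟨w, hw⟩ := hta
                have huw : u = t ++ '&' :: w := by rw [← hw]; simp
                refine h2 ⟨?_, ?_⟩
                · rw [huw, (pvTakeDrop t w hd).1]; exact ht
                · rw [huw, (pvTakeDrop t w hd).2]; rfl
              · exact (ih cs hcs).mp hinf
            · intro hmem
              exact Or.inr ((ih cs hcs).mpr hmem)
        · rw [if_neg h6]
          rw [List.infix_cons_iff]
          constructor
          · rintro (hpref | hinf)
            · exfalso
              apply h6
              rcases hpref with ⟨w, hw⟩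
              constructor
              · injection hw with h _; exact h.symm
              · injection hw with _ h
                apply List.isPrefixOf_iff_prefix.mpr
                exact ⟨t ++ ['&'] ++ w, by rw [← h]; simp⟩
            · exact (ih cs hcs).mp hinf
          · intro hmem
            exact Or.inr ((ih cs hcs).mpr hmem)
  intro l
  exact main l.length l le_rfl

theorem pvAnyEq (l : List Char) (S : List (List Char))
    (h : ∀ s ∈ S, s ≠ [] ∧ ∀ c ∈ s, PySem.Chars.isdigit c = true) :
    ((S.map pvPat).any (fun x => PySem.Chars.isIn x l))
      = ((extractItags l).any (fun t => S.contains t)) := by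
  rw [Bool.eq_iff_iff]
  simp only [List.any_eq_true, List.mem_map, List.contains_eq_mem, decide_eq_true_eq]
  constructor
  · rintro ⟨x, ⟨s, hs, rfl⟩, hinf⟩
    exact ⟨s, (pvKey s (h s hs).1 (h s hs).2 l).mp
      ((PySem.Chars.isIn_iff_infix _ _).mp hinf), hs⟩
  · rintro ⟨tt, htt, htS⟩
    exact ⟨pvPat tt, ⟨tt, htS, rfl⟩, (PySem.Chars.isIn_iff_infix _ _).mpr
      ((pvKey tt (h tt htS).1 (h tt htS).2 l).mpr htt)⟩

theorem pvCond1 (url : String) :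
    (["&itag=37&", "&itag=137&", "&itag=299&", "&itag=96&", "&itag=248&", "&itag=303&",
      "&itag=46&"] : List String).any (fun x => PySem.Str.isIn x url)
    = ((extractItags url.toList).any (fun t => set1080.contains t)) := by
  rw [← pvAnyEq url.toList set1080 (by intro s hs; fin_cases hs <;> exact ⟨by simp, by intro c hc; fin_cases hc <;> decide⟩)]
  have e : (set1080.map pvPat)
      = (["&itag=37&", "&itag=137&", "&itag=299&", "&itag=96&", "&itag=248&", "&itag=303&",
        "&itag=46&"] : List String).map String.toList := by rfl
  rw [e]
  simp

theorem pvCond2 (url : String) :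
    (["&itag=22&", "&itag=84&", "&itag=136&", "&itag=298&", "&itag=120&", "&itag=95&",
      "&itag=247&", "&itag=302&", "&itag=45&", "&itag=102&"] : List String).any
        (fun x => PySem.Str.isIn x url)
    = ((extractItags url.toList).any (fun t => setHD.contains t)) := by
  rw [← pvAnyEq url.toList setHD (by intro s hs; fin_cases hs <;> exact ⟨by simp, by intro c hc; fin_cases hc <;> decide⟩)]
  have e : (setHD.map pvPat)
      = (["&itag=22&", "&itag=84&", "&itag=136&", "&itag=298&", "&itag=120&", "&itag=95&",
        "&itag=247&", "&itag=302&", "&itag=45&", "&itag=102&"] : List String).map String.toList := by rfl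
  rw [e]
  simp

-- ===== VERDICT (by name: the statement is the Claim_ definition above) =====
theorem google_spec : Claim_equal_google := by
  intro url _
  unfold Spec_google google google_alt
  rw [pvCond1 url, pvCond2 url]
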